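-- pv_equiv track=rewrite | github.com/k-kan0926/paper_graph | rosbag_review/two_arm_modeling_with_height/analyze_bag_withheight_andpressure.py | find_topic
-- ===== SOURCE A (Python) =====
-- def find_topic(name_hint, topics):
--     """Find topic by hint (exact match or substring)"""
--     if name_hint in topics:
--         return name_hint
--
--     # Try exact suffix match
--     tails = [t for t in topics if t.endswith(name_hint)]
--     if tails:
--         return tails[0]
--
--     # Try substring match
--     parts = [t for t in topics if name_hint in t]
--     return parts[0] if parts else None
-- ===== SOURCE B (Python) =====
-- def find_topic(name_hint, topics):
--     """Find topic by hint (exact match or substring)"""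
--     # classify each topic with a priority rank and keep the argmin (first winner)
--     best_rank, best = 4, None
--     for t in topics:
--         if t == name_hint:
--             r = 0
--         elif t.endswith(name_hint):
--             r = 1
--         elif name_hint in t:
--             r = 2
--         else:
--             r = 3
--         if r < best_rank:
--             best_rank, best = r, t
--     return name_hint if best_rank == 0 else (best if best_rank < 3 else None)
-- ===== Notes on version B (the rewrite author's own statement) =====
-- stated objective: alternative
-- what changed: Instead of a membership test plus two sequential filter passes, B classifies each topic with a priority rank (0 exact, 1 suffix, 2 substring, 3 none) and keeps the first topic of minimal rank in a single argmin scan.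
import Mathlib
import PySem

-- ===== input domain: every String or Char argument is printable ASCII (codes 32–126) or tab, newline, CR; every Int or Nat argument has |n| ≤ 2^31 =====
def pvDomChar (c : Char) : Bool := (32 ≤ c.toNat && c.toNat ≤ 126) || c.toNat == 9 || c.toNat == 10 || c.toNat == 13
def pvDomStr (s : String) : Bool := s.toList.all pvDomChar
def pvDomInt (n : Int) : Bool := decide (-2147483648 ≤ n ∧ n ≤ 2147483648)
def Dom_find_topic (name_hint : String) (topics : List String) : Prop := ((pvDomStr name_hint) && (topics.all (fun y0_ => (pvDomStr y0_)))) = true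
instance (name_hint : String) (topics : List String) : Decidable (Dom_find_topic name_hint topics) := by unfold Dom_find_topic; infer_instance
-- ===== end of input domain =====

-- B replaces the membership test plus two filter passes by a single rank/argmin scan (objective: alternative, same cost).

-- ===== PORT A =====
def find_topic (name_hint : String) (topics : List String) : Option String :=
  if topics.contains name_hint then some name_hint
  else
    let tails := topics.filter (fun t => PySem.Str.endswith t name_hint)
    if !tails.isEmpty then tails.head?
    else
      let parts := topics.filter (fun t => PySem.Str.isIn name_hint t)
      parts.head?

-- ===== PORT B =====
def pvRank (name_hint t : String) : Nat :=
  if t == name_hint then 0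
  else if PySem.Str.endswith t name_hint then 1
  else if PySem.Str.isIn name_hint t then 2
  else 3

def pvBestLoop (name_hint : String) : List String → Nat → Option String → Nat × Option String
  | [], best_rank, best => (best_rank, best)
  | t :: ts, best_rank, best =>
    let r := pvRank name_hint t
    if r < best_rank then pvBestLoop name_hint ts r (some t)
    else pvBestLoop name_hint ts best_rank best

def find_topic_alt (name_hint : String) (topics : List String) : Option String :=
  let res := pvBestLoop name_hint topics 4 none
  if res.1 = 0 then some name_hint
  else if res.1 < 3 then res.2 else none

-- ===== PRECONDITION & SPEC =====
def Spec_find_topic (name_hint : String) (topics : List String) (out : Option String) : Prop := out = find_topic_alt name_hint topics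
instance (name_hint : String) (topics : List String) (out : Option String) : Decidable (Spec_find_topic name_hint topics out) := by unfold Spec_find_topic; infer_instance

-- ===== CLAIM (what is proved, stated in full; the proofs are below) =====
def Claim_equal_find_topic : Prop := ∀ (name_hint : String) (topics : List String), Dom_find_topic name_hint topics → Spec_find_topic name_hint topics (find_topic name_hint topics)

-- ===== LEMMAS AND PROOFS =====

-- minimal rank occurring in the list, 4 if the list is empty
def pvMinR (name_hint : String) (ts : List String) : Nat :=
  (ts.map (pvRank name_hint)).foldr min 4

lemma pvRank_le (nh t : String) : pvRank nh t ≤ 3 := by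
  unfold pvRank; split_ifs <;> omega

lemma pvMinR_le (nh : String) (ts : List String) : pvMinR nh ts ≤ 4 := by
  induction ts with
  | nil => simp [pvMinR]
  | cons t ts ih => simp only [pvMinR, List.map, List.foldr] at *; omega

lemma find?_eq_head?_filter {α : Type} (p : α → Bool) (l : List α) :
    l.find? p = (l.filter p).head? := by
  induction l with
  | nil => simp
  | cons a l ih =>
    by_cases h : p a
    · rw [List.find?_cons_of_pos h, List.filter_cons_of_pos h, List.head?_cons]
    · rw [List.find?_cons_of_neg h, List.filter_cons_of_neg h, ih]

lemma pvBestLoop_eq (nh : String) (ts : List String) (br : Nat) (b : Option String) (hbr : br ≤ 4) :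
    pvBestLoop nh ts br b =
      (min br (pvMinR nh ts),
       if pvMinR nh ts < br then ts.find? (fun t => pvRank nh t == pvMinR nh ts) else b) := by
  induction ts generalizing br b with
  | nil => simp [pvBestLoop, pvMinR]; omega
  | cons t ts ih =>
    have hrt := pvRank_le nh t
    have hm : pvMinR nh (t :: ts) = min (pvRank nh t) (pvMinR nh ts) := by
      simp [pvMinR]
    by_cases hr : pvRank nh t < br
    · rw [show pvBestLoop nh (t :: ts) br b = pvBestLoop nh ts (pvRank nh t) (some t) by
        simp [pvBestLoop, hr]]
      rw [ih _ _ (by omega), hm]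
      by_cases hlt : pvMinR nh ts < pvRank nh t
      · have h1 : ¬ (pvRank nh t == min (pvRank nh t) (pvMinR nh ts)) = true := by
          simp; omega
        refine Prod.ext (by simp; omega) ?_
        simp only [List.find?, h1]
        rw [if_pos hlt, if_pos (by omega)]
        congr 1
        funext x; congr 1; omega
      · have h1 : (pvRank nh t == min (pvRank nh t) (pvMinR nh ts)) = true := by
          simp; omega
        refine Prod.ext (by simp; omega) ?_
        simp only [List.find?, h1]
        rw [if_neg hlt, if_pos (by omega)]
    · rw [show pvBestLoop nh (t :: ts) br b = pvBestLoop nh ts br b by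
        simp [pvBestLoop, hr]]
      rw [ih _ _ hbr, hm]
      refine Prod.ext (by simp; omega) ?_
      by_cases hlt : pvMinR nh ts < br
      · have h1 : ¬ (pvRank nh t == min (pvRank nh t) (pvMinR nh ts)) = true := by
          simp; omega
        rw [if_pos hlt, if_pos (by omega)]
        simp only [List.find?, h1]
        congr 1
        funext x; congr 1; omega
      · rw [if_neg hlt, if_neg (by omega)]

lemma pvMinR_le_mem (nh : String) (ts : List String) :
    ∀ t ∈ ts, pvMinR nh ts ≤ pvRank nh t := by
  induction ts with
  | nil => intro t ht; cases ht
  | cons a l ih =>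
    intro t ht
    rcases List.mem_cons.mp ht with rfl | ht
    · simp [pvMinR]
    · have := ih t ht
      simp only [pvMinR, List.map, List.foldr] at this ⊢
      omega

lemma rank0_iff (nh t : String) : pvRank nh t = 0 ↔ t = nh := by
  unfold pvRank; split_ifs with h1 h2 h3 <;> simp_all

lemma alt_eq (nh : String) (ts : List String) :
    find_topic_alt nh ts =
      (if pvMinR nh ts = 0 then some nh
       else if pvMinR nh ts < 3 then ts.find? (fun t => pvRank nh t == pvMinR nh ts) else none) := by
  unfold find_topic_alt
  rw [pvBestLoop_eq _ _ _ _ (by omega)]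
  have h4 := pvMinR_le nh ts
  by_cases h0 : pvMinR nh ts = 0
  · simp [h0]
  · by_cases h3 : pvMinR nh ts < 3
    · simp only [min_eq_right h4]
      rw [if_neg h0, if_neg h0, if_pos h3, if_pos h3, if_pos (by omega)]
    · simp only [min_eq_right h4]
      rw [if_neg h0, if_neg h0, if_neg h3, if_neg h3]

lemma pvMinR_attain (nh : String) (ts : List String) :
    pvMinR nh ts = 4 ∨ ∃ t ∈ ts, pvRank nh t = pvMinR nh ts := by
  induction ts with
  | nil => left; simp [pvMinR]
  | cons a l ih =>
    have hra := pvRank_le nh a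
    have hm : pvMinR nh (a :: l) = min (pvRank nh a) (pvMinR nh l) := by simp [pvMinR]
    rcases ih with h4 | ⟨t, ht, hrt⟩
    · right; exact ⟨a, List.mem_cons_self, by omega⟩
    · right
      by_cases hle : pvRank nh a ≤ pvMinR nh l
      · exact ⟨a, List.mem_cons_self, by omega⟩
      · exact ⟨t, List.mem_cons_of_mem _ ht, by omega⟩

-- ===== VERDICT (by name: the statement is the Claim_ definition above) =====
theorem find_topic_spec : Claim_equal_find_topic := by
  intro nh ts _
  unfold Spec_find_topic find_topic
  rw [alt_eq]
  have hmem := pvMinR_le_mem nh ts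
  have hatt := pvMinR_attain nh ts
  by_cases hc : ts.contains nh
  · have hnh : nh ∈ ts := by simpa using hc
    have hr0 : pvRank nh nh = 0 := (rank0_iff nh nh).mpr rfl
    have h0 : pvMinR nh ts = 0 := by have := hmem nh hnh; omega
    rw [if_pos hc, if_pos h0]
  · have hne : ∀ t ∈ ts, pvRank nh t ≠ 0 := by
      intro t ht h0
      have : t = nh := (rank0_iff nh t).mp h0
      exact hc (by simp only [List.contains_iff_mem]; exact this ▸ ht)
    have h0 : pvMinR nh ts ≠ 0 := by
      intro h0
      rcases hatt with h4 | ⟨t, ht, hrt⟩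
      · omega
      · exact hne t ht (by omega)
    rw [if_neg hc, if_neg h0]
    show (if !(ts.filter (fun t => PySem.Str.endswith t nh)).isEmpty then
            (ts.filter (fun t => PySem.Str.endswith t nh)).head?
          else (ts.filter (fun t => PySem.Str.isIn nh t)).head?) = _
    by_cases hT : (ts.filter (fun t => PySem.Str.endswith t nh)).isEmpty
    · -- no suffix match in ts
      have hnosuf : ∀ t ∈ ts, PySem.Str.endswith t nh = false := by
        intro t ht
        by_contra h
        have hmemf : t ∈ ts.filter (fun t => PySem.Str.endswith t nh) :=
          List.mem_filter.mpr ⟨ht, by simpa using h⟩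
        rw [List.isEmpty_iff.mp hT] at hmemf
        cases hmemf
      have hge2 : ∀ t ∈ ts, 2 ≤ pvRank nh t := by
        intro t ht
        have h1 := hne t ht
        have h2 := hnosuf t ht
        unfold pvRank at h1 ⊢
        split_ifs at h1 ⊢ <;> simp_all
      by_cases hP : (ts.filter (fun t => PySem.Str.isIn nh t)).isEmpty
      · -- nothing matches at all
        have hnoin : ∀ t ∈ ts, PySem.Str.isIn nh t = false := by
          intro t ht
          by_contra h
          have hmemf : t ∈ ts.filter (fun t => PySem.Str.isIn nh t) :=
            List.mem_filter.mpr ⟨ht, by simpa using h⟩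
          rw [List.isEmpty_iff.mp hP] at hmemf
          cases hmemf
        have h3 : ¬ pvMinR nh ts < 3 := by
          intro hlt
          rcases hatt with h4 | ⟨t, ht, hrt⟩
          · omega
          · have h2 := hnosuf t ht
            have hi := hnoin t ht
            have h1 := hne t ht
            unfold pvRank at hrt
            rw [h2, hi] at hrt
            split_ifs at hrt <;> omega
        rw [if_neg h3, List.isEmpty_iff.mp hT, List.isEmpty_iff.mp hP]
        rfl
      · -- substring match exists, no suffix match : minimal rank is 2
        have hPne : ts.filter (fun t => PySem.Str.isIn nh t) ≠ [] :=
          fun h => hP (by rw [h]; rfl)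
        obtain ⟨t0, ht0⟩ := List.exists_mem_of_ne_nil _ hPne
        have ht0m : t0 ∈ ts := (List.mem_filter.mp ht0).1
        have ht0i : PySem.Str.isIn nh t0 = true := by
          simpa using (List.mem_filter.mp ht0).2
        have hr2 : pvRank nh t0 = 2 := by
          have h1 := hne t0 ht0m
          have h2 := hnosuf t0 ht0m
          unfold pvRank at h1 ⊢
          rw [h2, ht0i] at *
          split_ifs at h1 ⊢ <;> simp_all
        have hm2 : pvMinR nh ts = 2 := by
          have ha := hmem t0 ht0m
          have hb := hge2 t0 ht0m
          rcases hatt with h4 | ⟨u, hu, hru⟩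
          · omega
          · have := hge2 u hu; omega
        rw [hm2, if_pos (show (2:Nat) < 3 by omega), find?_eq_head?_filter]
        have hfe : ts.filter (fun t => pvRank nh t == 2) = ts.filter (fun t => PySem.Str.isIn nh t) := by
          apply List.filter_congr
          intro t ht
          have h1 := hne t ht
          have h2 := hnosuf t ht
          unfold pvRank at h1 ⊢
          split_ifs at h1 ⊢ <;> simp_all
        rw [hfe, List.isEmpty_iff.mp hT]
        rfl
    · -- a suffix match exists : minimal rank is 1
      have hTne : ts.filter (fun t => PySem.Str.endswith t nh) ≠ [] :=
        fun h => hT (by rw [h]; rfl)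
      obtain ⟨t0, ht0⟩ := List.exists_mem_of_ne_nil _ hTne
      have ht0m : t0 ∈ ts := (List.mem_filter.mp ht0).1
      have ht0e : PySem.Str.endswith t0 nh = true := by
        simpa using (List.mem_filter.mp ht0).2
      have hr1 : pvRank nh t0 = 1 := by
        have h1 := hne t0 ht0m
        unfold pvRank at h1 ⊢
        rw [ht0e] at *
        split_ifs at h1 ⊢ <;> simp_all
      have hm1 : pvMinR nh ts = 1 := by
        have ha := hmem t0 ht0m
        omega
      rw [hm1, if_pos (show (1:Nat) < 3 by omega), find?_eq_head?_filter]
      have hfe : ts.filter (fun t => pvRank nh t == 1) = ts.filter (fun t => PySem.Str.endswith t nh) := by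
        apply List.filter_congr
        intro t ht
        have h1 := hne t ht
        unfold pvRank at h1 ⊢
        split_ifs at h1 ⊢ <;> simp_all
      have hTf : (ts.filter (fun t => PySem.Str.endswith t nh)).isEmpty = false := by
        cases h : (ts.filter (fun t => PySem.Str.endswith t nh)).isEmpty
        · rfl
        · exact absurd h hT
      rw [hfe, hTf]
      rfl
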